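-- pv_equiv track=rewrite | github.com/SimGus/Chatette | chatette/parsing/parser_utils.py | add_escapement_back_in_choice_item
-- ===== SOURCE A (Python) =====
-- ESCAPE_SYM = '\\'
--
-- CHOICE_SEP = '/'  # TODO: deprecate and rather use '|'
--
-- def add_escapement_back_in_choice_item(text):
--     """
--     Put escapement back where it belongs in choice items
--     where escapement has been removed.
--     Add escapement only in items where escapement has already been added,
--     not knowing they are part of a choice.
--     """
--     escaped_text = ""
--     escaped = False
--     for c in text:
--         if escaped:
--             escaped_text += c
--             escaped = False
--             continue
--         if c == ESCAPE_SYM: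
--             escaped_text += c
--             escaped = True
--             continue
--         if is_choice_special_sym(c):
--             escaped_text += ESCAPE_SYM + c
--         else:
--             escaped_text += c
--     return escaped_text
--
-- def is_choice_special_sym(text):
--     """
--     Returns `True` iff `text` is a special symbol in a choice (and in nothing
--     else). This doesn't take into account boundary symbols.
--     """
--     return text == CHOICE_SEP
-- ===== SOURCE B (Python) =====
-- import re
--
-- def add_escapement_back_in_choice_item(text):
--     """
--     Put escapement back where it belongs in choice items.
--     One re.sub pass: an escaped pair is kept as-is, a bare choice
--     separator '/' gets a backslash prepended.
--     """
--     return re.sub(r'\\.|/',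
--                   lambda m: m.group() if m.group().startswith('\\')
--                   else '\\' + m.group(),
--                   text)
-- ===== Notes on version B (the rewrite author's own statement) =====
-- stated objective: idiomatic
-- what changed: Replaced the explicit character loop carrying an escaped-state flag by a single regex substitution whose alternation consumes already-escaped pairs unchanged and prepends a backslash to each bare choice separator.
import Mathlib
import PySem

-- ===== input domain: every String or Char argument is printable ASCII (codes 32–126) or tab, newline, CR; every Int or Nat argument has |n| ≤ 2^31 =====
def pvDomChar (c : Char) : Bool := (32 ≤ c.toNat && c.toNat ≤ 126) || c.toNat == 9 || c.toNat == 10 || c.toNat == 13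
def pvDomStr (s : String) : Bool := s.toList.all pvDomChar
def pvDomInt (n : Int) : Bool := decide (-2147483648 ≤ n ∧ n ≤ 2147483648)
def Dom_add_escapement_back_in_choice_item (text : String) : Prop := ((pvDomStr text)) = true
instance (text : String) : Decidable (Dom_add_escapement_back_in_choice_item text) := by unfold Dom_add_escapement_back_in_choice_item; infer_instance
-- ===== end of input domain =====

-- B replaces A's explicit escaped-flag loop by a single regex substitution pass (idiomatic).


-- ===== PORT A =====
-- A's for-loop with its (escaped_text, escaped) state, as a foldl over the characters.
def add_escapement_back_in_choice_item (text : String) : String :=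
  (text.toList.foldl
    (fun (st : String × Bool) c =>
      if st.2 then (st.1.push c, false)
      else if c = '\\' then (st.1.push c, true)
      else if c = '/' then ((st.1.push '\\').push c, false)
      else (st.1.push c, false))
    ("", false)).1

-- ===== PORT B =====
-- Hand-port of Source B's single re.sub(r'\\.|/', repl, text) pass: the scanner consumes an
-- escaped pair unchanged, prepends '\' to a bare '/', and copies any other character.
-- (The only `re` subtlety, '.' not matching '\n', is output-identical: a '\'+'\n' pair is
-- copied unchanged either way.)
def pvReSubGo : List Char → List Char
  | [] => []
  | '\\' :: c :: rest => '\\' :: c :: pvReSubGo rest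
  | '/' :: rest => '\\' :: '/' :: pvReSubGo rest
  | c :: rest => c :: pvReSubGo rest

def add_escapement_back_in_choice_item_alt (text : String) : String :=
  String.ofList (pvReSubGo text.toList)

-- ===== PRECONDITION & SPEC =====
def Spec_add_escapement_back_in_choice_item (text : String) (out : String) : Prop := out = add_escapement_back_in_choice_item_alt text
instance (text : String) (out : String) : Decidable (Spec_add_escapement_back_in_choice_item text out) := by unfold Spec_add_escapement_back_in_choice_item; infer_instance

-- ===== CLAIM (what is proved, stated in full; the proofs are below) =====
def Claim_equal_add_escapement_back_in_choice_item : Prop := ∀ (text : String), Dom_add_escapement_back_in_choice_item text → Spec_add_escapement_back_in_choice_item text (add_escapement_back_in_choice_item text)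

-- ===== LEMMAS AND PROOFS =====

-- Character-level description of A's remaining output given the current escaped flag.
def pvASpec : Bool → List Char → List Char
  | _, [] => []
  | true, c :: rest => c :: pvASpec false rest
  | false, c :: rest =>
    if c = '\\' then c :: pvASpec true rest
    else if c = '/' then '\\' :: '/' :: pvASpec false rest
    else c :: pvASpec false rest

theorem pvA_foldl (l : List Char) : ∀ (s : String) (b : Bool),
    (l.foldl
      (fun (st : String × Bool) c =>
        if st.2 then (st.1.push c, false)
        else if c = '\\' then (st.1.push c, true)
        else if c = '/' then ((st.1.push '\\').push c, false)
        else (st.1.push c, false))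
      (s, b)).1.toList = s.toList ++ pvASpec b l := by
  induction l with
  | nil => intro s b; simp [pvASpec]
  | cons c rest ih =>
    intro s b
    cases b with
    | true => simp [List.foldl, pvASpec, ih]
    | false =>
      by_cases h1 : c = '\\'
      · simp [List.foldl, pvASpec, h1, ih]
      · by_cases h2 : c = '/'
        · simp [List.foldl, pvASpec, h2, ih]
        · simp [List.foldl, pvASpec, h1, h2, ih]

theorem pvASpec_eq_reSub (l : List Char) : pvASpec false l = pvReSubGo l := by
  induction l using pvReSubGo.induct with
  | case1 => rfl
  | case2 c rest ih => simp [pvASpec, pvReSubGo, ih]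
  | case3 rest ih => simp [pvASpec, pvReSubGo, ih]
  | case4 c rest h1 h2 ih =>
    by_cases hc : c = '\\'
    · cases rest with
      | nil => simp [pvASpec, pvReSubGo, hc]
      | cons d r => exact absurd rfl (h1 d r hc)
    · have h2' : ¬ c = '/' := h2
      simp [pvASpec, pvReSubGo, hc, h2', ih]

-- ===== VERDICT (by name: the statement is the Claim_ definition above) =====
theorem add_escapement_back_in_choice_item_spec : Claim_equal_add_escapement_back_in_choice_item := by
  intro text _
  unfold Spec_add_escapement_back_in_choice_item add_escapement_back_in_choice_item add_escapement_back_in_choice_item_alt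
  apply String.toList_injective
  rw [pvA_foldl]
  simp [pvASpec_eq_reSub]
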